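-- pv_equiv track=rewrite | github.com/sboora/stringsync | core/AudioProcessor.py | filter_consecutive_notes
-- ===== SOURCE A (Python) =====
-- def filter_consecutive_notes(notes, min_consecutive=1):
--     filtered_notes = []
--     prev_note = None
--     count = 0
--     for note in notes:
--         if note == prev_note:
--             count += 1
--         else:
--             count = 1
--         if count == min_consecutive:
--             filtered_notes.append(note)
--         prev_note = note
--     return list(dict.fromkeys(filtered_notes))
-- ===== SOURCE B (Python) =====
-- def filter_consecutive_notes(notes, min_consecutive=1):
--     # run-length encode the sequence, then keep keys of runs meeting the threshold
--     runs = []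
--     for note in notes:
--         if runs and runs[-1][0] == note:
--             runs[-1][1] += 1
--         else:
--             runs.append([note, 1])
--     filtered = [key for key, n in runs if n >= min_consecutive]
--     return list(dict.fromkeys(filtered))
-- ===== Notes on version B (the rewrite author's own statement) =====
-- stated objective: alternative
-- what changed: Replaces the streaming prev/count counter that emits a note exactly when its count equals min_consecutive with an explicit run-length-encoding pass followed by a run-filtering comprehension (keep run keys with length >= min_consecutive), then the same order-preserving dedup; Pre_ excludes nonpositive min_consecutive, a degenerate threshold on which no behaviour is specified and A returning an empty list and B returning every distinct note are both defensible.
-- outside the precondition, e.g. on filter_consecutive_notes(['C'], 0): A returns [], B returns ['C']; on filter_consecutive_notes(['C', 'C', 'D'], -1): A returns [], B returns ['C', 'D']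
import Mathlib
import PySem

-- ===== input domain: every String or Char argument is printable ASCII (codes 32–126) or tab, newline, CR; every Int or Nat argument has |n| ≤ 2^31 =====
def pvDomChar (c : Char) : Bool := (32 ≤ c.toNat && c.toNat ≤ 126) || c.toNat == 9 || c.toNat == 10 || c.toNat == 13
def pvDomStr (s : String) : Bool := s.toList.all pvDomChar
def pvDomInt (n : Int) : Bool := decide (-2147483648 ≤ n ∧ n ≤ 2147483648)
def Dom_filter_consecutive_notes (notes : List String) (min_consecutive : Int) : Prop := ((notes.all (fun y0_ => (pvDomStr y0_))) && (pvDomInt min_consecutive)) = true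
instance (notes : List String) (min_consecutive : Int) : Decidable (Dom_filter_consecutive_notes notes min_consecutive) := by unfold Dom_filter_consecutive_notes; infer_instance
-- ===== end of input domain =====

-- B replaces A's streaming prev/count counter with a run-length-encoding pass plus a
-- run-filtering comprehension (objective: alternative decomposition, same O(n) cost);
-- Pre_ restricts to positive thresholds, where the function's behaviour is specified.

-- ===== PORT A =====
-- loop body of A: state = (filtered_notes, prev_note, count)
def aStep (m : Int) (st : List String × Option String × Int) (note : String) :
    List String × Option String × Int :=
  let count : Int := if some note = st.2.1 then st.2.2 + 1 else 1
  let filtered := if count = m then st.1 ++ [note] else st.1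
  (filtered, some note, count)

def filter_consecutive_notes (notes : List String) (min_consecutive : Int) : List String :=
  PySem.List.dedup ((notes.foldl (aStep min_consecutive) ([], none, 0)).1)

-- ===== PORT B =====
-- loop body of B's first pass: extend or start the last run
def runStep (acc : List (String × Int)) (note : String) : List (String × Int) :=
  match acc.getLast? with
  | some (y, n) => if y = note then acc.dropLast ++ [(y, n + 1)] else acc ++ [(note, 1)]
  | none => [(note, 1)]

def filter_consecutive_notes_alt (notes : List String) (min_consecutive : Int) : List String :=
  let runs := notes.foldl runStep []
  PySem.List.dedup (runs.filterMap (fun p =>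
    if min_consecutive ≤ p.2 then some p.1 else none))

-- ===== PRECONDITION & SPEC =====
-- Pre_ excludes nonpositive min_consecutive: a degenerate threshold no caller would pass, on
-- which no behaviour is specified — A returns an empty list and B returns every distinct note, both
-- defensible readings of the corner.
def Pre_filter_consecutive_notes (_notes : List String) (min_consecutive : Int) : Prop :=
  1 ≤ min_consecutive
instance (notes : List String) (min_consecutive : Int) : Decidable (Pre_filter_consecutive_notes notes min_consecutive) := by unfold Pre_filter_consecutive_notes; infer_instance

def pvWitness_filter_consecutive_notes : List String × Int := (["C", "C", "D"], 2)

def Spec_filter_consecutive_notes (notes : List String) (min_consecutive : Int) (out : List String) : Prop := out = filter_consecutive_notes_alt notes min_consecutive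
instance (notes : List String) (min_consecutive : Int) (out : List String) : Decidable (Spec_filter_consecutive_notes notes min_consecutive out) := by unfold Spec_filter_consecutive_notes; infer_instance

-- ===== CLAIM (what is proved, stated in full; the proofs are below) =====
def Claim_equal_filter_consecutive_notes : Prop := ∀ (notes : List String) (min_consecutive : Int), Dom_filter_consecutive_notes notes min_consecutive → Pre_filter_consecutive_notes notes min_consecutive → Spec_filter_consecutive_notes notes min_consecutive (filter_consecutive_notes notes min_consecutive)

-- ===== LEMMAS AND PROOFS =====

-- A's emitted notes characterised through run keys: a run of key y, length n, contributes y
-- exactly when A's counter hit m inside it, i.e. 1 ≤ m ≤ n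
def sel (m : Int) : String × Int → Option String :=
  fun p => if 1 ≤ m ∧ m ≤ p.2 then some p.1 else none

-- what A has emitted so far for the current, still-open run (key y, seen n times)
def selOne (m : Int) (y : String) (n : Int) : List String :=
  if 1 ≤ m ∧ m ≤ n then [y] else []

lemma runStep_concat (rs : List (String × Int)) (y : String) (n : Int) (note : String) :
    runStep (rs ++ [(y, n)]) note =
      if y = note then rs ++ [(y, n + 1)] else (rs ++ [(y, n)]) ++ [(note, 1)] := by
  simp [runStep]

lemma loop_inv (m : Int) (notes : List String) :
    ∀ (rs : List (String × Int)) (y : String) (n : Int), 1 ≤ n →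
      (notes.foldl (aStep m) (rs.filterMap (sel m) ++ selOne m y n, some y, n)).1
        = (notes.foldl runStep (rs ++ [(y, n)])).filterMap (sel m) := by
  induction notes with
  | nil =>
    intro rs y n _
    simp only [List.foldl_nil, List.filterMap_append, sel, selOne]
    split_ifs <;> simp_all
  | cons note rest ih =>
    intro rs y n hn
    simp only [List.foldl_cons, runStep_concat]
    by_cases h : note = y
    · subst h
      have hA : aStep m (rs.filterMap (sel m) ++ selOne m note n, some note, n) note
          = (rs.filterMap (sel m) ++ selOne m note (n + 1), some note, n + 1) := by
        simp only [aStep]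
        congr 1
        unfold selOne
        split_ifs <;> simp_all <;> omega
      rw [hA, if_pos rfl]
      exact ih rs note (n + 1) (by omega)
    · have hA : aStep m (rs.filterMap (sel m) ++ selOne m y n, some y, n) note
          = ((rs ++ [(y, n)]).filterMap (sel m) ++ selOne m note 1, some note, 1) := by
        have hne : ¬ (some note = some y) := by simpa using h
        simp only [aStep, if_neg hne]
        simp only [List.filterMap_append, List.append_assoc]
        congr 1
        unfold sel selOne
        split_ifs <;> simp_all <;> omega
      rw [hA, if_neg (fun hy => h hy.symm)]
      exact ih (rs ++ [(y, n)]) note 1 (by omega)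

-- A's port as dedup of the guard-filtered runs (every m)
lemma a_eq_runs (notes : List String) (m : Int) :
    filter_consecutive_notes notes m
      = PySem.List.dedup ((notes.foldl runStep []).filterMap (sel m)) := by
  unfold filter_consecutive_notes
  cases notes with
  | nil => rfl
  | cons note rest =>
    simp only [List.foldl_cons]
    have hA : aStep m ([], none, 0) note = (selOne m note 1, some note, 1) := by
      simp only [aStep, reduceCtorEq]
      unfold selOne
      split_ifs <;> simp_all <;> omega
    have hB : runStep [] note = [] ++ [(note, 1)] := by simp [runStep]
    rw [hA, hB]
    have := loop_inv m rest [] note 1 le_rfl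
    simp only [List.filterMap_nil, List.nil_append] at this ⊢
    rw [this]

-- ===== VERDICT (by name: the statement is the Claim_ definition above) =====
theorem filter_consecutive_notes_spec : Claim_equal_filter_consecutive_notes := by
  intro notes m _ hm
  unfold Spec_filter_consecutive_notes
  rw [a_eq_runs]
  unfold filter_consecutive_notes_alt
  congr 1
  apply List.filterMap_congr
  intro p _
  unfold sel
  unfold Pre_filter_consecutive_notes at hm
  split_ifs <;> simp_all
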